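-- pv_equiv track=rewrite | github.com/mishaSH07/Binary-Search-Treasure-Islands | app.py | generate_array_from_range
-- ===== SOURCE A (Python) =====
-- def generate_array_from_range(start, end, mode):
--     """
--     Generate a comma-separated string of ints between start and end (inclusive),
--     filtered by parity mode: 'Even', 'Odd', or 'Both'.
--     """
--     try:
--         start = int(start)
--         end = int(end)
--     except (TypeError, ValueError):
--         return "1, 2, 3, 4, 5, 6, 7, 8, 9, 10"  # fallback
--
--     if end <= start:
--         # Simple guard: if bad range, just return start
--         return str(start)
--
--     if mode == "Even":
--         first = start if start % 2 == 0 else start + 1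
--         nums = list(range(first, end + 1, 2))
--     elif mode == "Odd":
--         first = start if start % 2 != 0 else start + 1
--         nums = list(range(first, end + 1, 2))
--     else:  # "Both"
--         nums = list(range(start, end + 1))
--
--     return ", ".join(str(x) for x in nums)
-- ===== SOURCE B (Python) =====
-- def generate_array_from_range(start, end, mode):
--     """Same result as A: one pass over the full range with a parity filter
--     chosen from mode, instead of aligning a first element and striding by 2."""
--     try:
--         start = int(start)
--         end = int(end)
--     except (TypeError, ValueError):
--         return "1, 2, 3, 4, 5, 6, 7, 8, 9, 10"  # fallback
--
--     if end <= start: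
--         return str(start)
--
--     if mode == "Even":
--         keep = lambda x: x % 2 == 0
--     elif mode == "Odd":
--         keep = lambda x: x % 2 != 0
--     else:
--         keep = lambda x: True
--
--     return ", ".join(str(x) for x in range(start, end + 1) if keep(x))
-- ===== Notes on version B (the rewrite author's own statement) =====
-- stated objective: simpler
-- what changed: Replaces the three per-mode branches that compute an aligned first element and build a stride-2 range with a single full-range pass filtered by a parity predicate selected once from mode.
import Mathlib
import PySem

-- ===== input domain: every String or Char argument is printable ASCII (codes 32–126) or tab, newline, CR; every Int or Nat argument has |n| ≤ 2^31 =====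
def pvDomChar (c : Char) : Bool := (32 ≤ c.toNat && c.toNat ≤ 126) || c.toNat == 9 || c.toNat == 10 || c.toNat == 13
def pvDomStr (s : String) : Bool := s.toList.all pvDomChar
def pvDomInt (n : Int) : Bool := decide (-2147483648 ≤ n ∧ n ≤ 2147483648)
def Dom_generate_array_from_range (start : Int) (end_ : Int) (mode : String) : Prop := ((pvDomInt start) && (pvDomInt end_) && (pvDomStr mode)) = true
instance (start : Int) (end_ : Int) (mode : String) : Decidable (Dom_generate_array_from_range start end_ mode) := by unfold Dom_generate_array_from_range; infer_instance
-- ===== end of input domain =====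

-- B collapses A's three per-mode branches (aligned first element + stride-2 range) into one
-- full-range pass with a parity filter chosen once from mode; objective: simpler.
-- (int(start)/int(end) on Int arguments are the identity and never raise, so the
--  try/except fallback of both Pythons is unreachable under the type convention.)

-- ===== PORT A =====
def generate_array_from_range (start : Int) (end_ : Int) (mode : String) : String :=
  if end_ ≤ start then PySem.Int.toStr start
  else
    let nums :=
      if mode == "Even" then
        let first := if PySem.Int.mod start 2 == 0 then start else start + 1
        PySem.List.pyRange first (end_ + 1) 2
      else if mode == "Odd" then
        let first := if PySem.Int.mod start 2 != 0 then start else start + 1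
        PySem.List.pyRange first (end_ + 1) 2
      else
        PySem.List.pyRange start (end_ + 1) 1
    PySem.Str.join ", " (nums.map PySem.Int.toStr)

-- ===== PORT B =====
def generate_array_from_range_alt (start : Int) (end_ : Int) (mode : String) : String :=
  if end_ ≤ start then PySem.Int.toStr start
  else
    let keep : Int → Bool :=
      if mode == "Even" then fun x => PySem.Int.mod x 2 == 0
      else if mode == "Odd" then fun x => PySem.Int.mod x 2 != 0
      else fun _ => true
    PySem.Str.join ", "
      (((PySem.List.pyRange start (end_ + 1) 1).filter keep).map PySem.Int.toStr)

-- ===== PRECONDITION & SPEC =====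
def Spec_generate_array_from_range (start : Int) (end_ : Int) (mode : String) (out : String) : Prop := out = generate_array_from_range_alt start end_ mode
instance (start : Int) (end_ : Int) (mode : String) (out : String) : Decidable (Spec_generate_array_from_range start end_ mode out) := by unfold Spec_generate_array_from_range; infer_instance

-- ===== CLAIM (what is proved, stated in full; the proofs are below) =====
def Claim_equal_generate_array_from_range : Prop := ∀ (start : Int) (end_ : Int) (mode : String), Dom_generate_array_from_range start end_ mode → Spec_generate_array_from_range start end_ mode (generate_array_from_range start end_ mode)

-- ===== LEMMAS AND PROOFS =====

theorem pv_mod_two (x : Int) : PySem.Int.mod x 2 = x % 2 := by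
  simp [PySem.Int.mod, Int.fmod_eq_emod]

theorem pyRange_two_nil (a b : Int) (h : b ≤ a) : PySem.List.pyRange a b 2 = [] := by
  rw [PySem.List.pyRange_of_pos a b (by norm_num)]
  simp [show ¬ a < b by omega]

theorem pyRange_two_cons (a b : Int) (h : a < b) :
    PySem.List.pyRange a b 2 = a :: PySem.List.pyRange (a + 2) b 2 := by
  rw [PySem.List.pyRange_of_pos a b (by norm_num), PySem.List.pyRange_of_pos (a+2) b (by norm_num)]
  by_cases h2 : a + 2 < b
  · have hn : (if a < b then ((b - a + 2 - 1) / 2).toNat else 0)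
        = (if a + 2 < b then ((b - (a+2) + 2 - 1) / 2).toNat else 0) + 1 := by
      simp only [if_pos h, if_pos h2]
      omega
    rw [hn, List.range_succ_eq_map]
    simp only [List.map_cons, List.map_map, Function.comp_def]
    congr 1
    · norm_num
    · apply List.map_congr_left
      intro k _
      push_cast
      ring
  · have hn : (if a < b then ((b - a + 2 - 1) / 2).toNat else 0) = 1 := by
      simp only [if_pos h]; omega
    rw [hn]
    simp [show ¬ a + 2 < b from h2]

theorem stride2_filter : ∀ (n : Nat) (a b : Int), (b - a).toNat ≤ n →
    PySem.List.pyRange a b 2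
      = (PySem.List.pyRange a b 1).filter (fun x => x % 2 == a % 2) := by
  intro n
  induction n with
  | zero =>
    intro a b h
    have hba : b ≤ a := by omega
    rw [pyRange_two_nil a b hba, PySem.List.pyRange_one_eq_nil hba]
    rfl
  | succ m ih =>
    intro a b h
    by_cases hab : a < b
    · rw [pyRange_two_cons a b hab, PySem.List.pyRange_one_cons hab]
      rw [List.filter_cons_of_pos (by simp)]
      congr 1
      by_cases hab1 : a + 1 < b
      · rw [PySem.List.pyRange_one_cons hab1]
        rw [List.filter_cons_of_neg (by simp; omega)]
        rw [show a + 1 + 1 = a + 2 from by ring]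
        rw [ih (a + 2) b (by omega)]
        apply List.filter_congr
        intro x _
        simp only [show (a + 2) % 2 = a % 2 from by omega]
      · rw [PySem.List.pyRange_one_eq_nil (by omega), pyRange_two_nil _ _ (by omega)]
        rfl
    · rw [pyRange_two_nil a b (by omega), PySem.List.pyRange_one_eq_nil (by omega)]
      rfl

-- ===== VERDICT (by name: the statement is the Claim_ definition above) =====
theorem generate_array_from_range_spec : Claim_equal_generate_array_from_range := by
  intro start end_ mode _
  unfold Spec_generate_array_from_range generate_array_from_range generate_array_from_range_alt
  by_cases hg : end_ ≤ start
  · simp [hg]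
  · simp only [if_neg hg]
    have hlt : start < end_ + 1 := by omega
    have hpar : start % 2 = 0 ∨ start % 2 = 1 := by omega
    congr 1
    by_cases hE : mode == "Even"
    · simp only [if_pos hE, pv_mod_two]
      by_cases hp : start % 2 = 0
      · rw [if_pos (by simp [hp])]
        congr 1
        rw [stride2_filter (end_ + 1 - start).toNat start (end_ + 1) le_rfl]
        exact List.filter_congr (fun x _ => by simp [hp])
      · have hp1 : start % 2 = 1 := by omega
        rw [if_neg (by simp [hp1])]
        congr 1
        rw [PySem.List.pyRange_one_cons hlt]
        rw [List.filter_cons_of_neg (by simp [hp1])]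
        rw [stride2_filter (end_ + 1 - (start+1)).toNat (start+1) (end_ + 1) le_rfl]
        exact List.filter_congr (fun x _ => by simp [show (start + 1) % 2 = 0 from by omega])
    · simp only [if_neg hE]
      by_cases hO : mode == "Odd"
      · simp only [if_pos hO, pv_mod_two]
        by_cases hp : start % 2 = 0
        · rw [if_neg (by simp [hp])]
          congr 1
          rw [PySem.List.pyRange_one_cons hlt]
          rw [List.filter_cons_of_neg (by simp [hp])]
          rw [stride2_filter (end_ + 1 - (start+1)).toNat (start+1) (end_ + 1) le_rfl]
          apply List.filter_congr
          intro x _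
          have hx : x % 2 = 0 ∨ x % 2 = 1 := by omega
          rcases hx with h | h <;> simp [h, show (start + 1) % 2 = 1 from by omega]
        · have hp1 : start % 2 = 1 := by omega
          rw [if_pos (by simp [hp1])]
          congr 1
          rw [stride2_filter (end_ + 1 - start).toNat start (end_ + 1) le_rfl]
          apply List.filter_congr
          intro x _
          have hx : x % 2 = 0 ∨ x % 2 = 1 := by omega
          rcases hx with h | h <;> simp [h, hp1]
      · simp only [if_neg hO, List.filter_true]
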